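-- pv_equiv track=rewrite | github.com/bsharabi/Python | Lesson  05 - 21.11.18/Tic_tac_toc.py | create_size_game
-- ===== SOURCE A (Python) =====
-- def create_size_game(size):
--     table=[]
--     table_g=[]
--     k=1
--     for i in range(size):
--         for i in range(size):
--             table.append(k)
--             k+=1
--         table_g.append(table)
--         table=[]
--     return table_g
-- ===== SOURCE B (Python) =====
-- def create_size_game(size):
--     if size <= 0:
--         return []
--     nums = list(range(1, size * size + 1))
--     return [nums[i * size:(i + 1) * size] for i in range(size)]
-- ===== Notes on version B (the rewrite author's own statement) =====
-- stated objective: simpler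
-- what changed: Replaces A's nested loops with a mutable running counter and per-row accumulator by generating the whole flat sequence once with range(1, size*size+1) and chunking it into rows by slicing.
import Mathlib
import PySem

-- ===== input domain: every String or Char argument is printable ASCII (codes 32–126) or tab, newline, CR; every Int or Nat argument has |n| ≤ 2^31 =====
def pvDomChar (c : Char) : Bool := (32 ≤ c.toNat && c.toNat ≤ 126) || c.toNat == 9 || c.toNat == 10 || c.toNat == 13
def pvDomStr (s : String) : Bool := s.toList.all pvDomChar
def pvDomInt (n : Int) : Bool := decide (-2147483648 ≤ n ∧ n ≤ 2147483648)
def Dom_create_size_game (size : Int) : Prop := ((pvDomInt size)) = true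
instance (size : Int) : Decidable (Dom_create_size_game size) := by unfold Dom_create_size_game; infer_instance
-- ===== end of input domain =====

-- B builds the flat list range(1, size*size+1) once and chunks it into rows by slicing,
-- instead of A's nested fill with a running counter; objective: simpler.

-- ===== PORT A =====
-- state: (table_g, table, k) as in the Python (table=[] restarts each outer iteration)
def create_size_game (size : Int) : List (List Int) :=
  let final :=
    (PySem.List.pyRange 0 size 1).foldl
      (fun (st : List (List Int) × List Int × Int) _ =>
        let inner :=
          (PySem.List.pyRange 0 size 1).foldl
            (fun (st2 : List Int × Int) _ => (st2.1 ++ [st2.2], st2.2 + 1))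
            (st.2.1, st.2.2)
        (st.1 ++ [inner.1], [], inner.2))
      ([], [], 1)
  final.1

-- ===== PORT B =====
def create_size_game_alt (size : Int) : List (List Int) :=
  if size ≤ 0 then []
  else
    let nums := PySem.List.pyRange 1 (size * size + 1) 1
    (PySem.List.pyRange 0 size 1).map
      (fun i => PySem.List.slice nums (some (i * size)) (some ((i + 1) * size)))

-- ===== PRECONDITION & SPEC =====
def Spec_create_size_game (size : Int) (out : List (List Int)) : Prop := out = create_size_game_alt size
instance (size : Int) (out : List (List Int)) : Decidable (Spec_create_size_game size out) := by unfold Spec_create_size_game; infer_instance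

-- ===== CLAIM (what is proved, stated in full; the proofs are below) =====
def Claim_equal_create_size_game : Prop := ∀ (size : Int), Dom_create_size_game size → Spec_create_size_game size (create_size_game size)

-- ===== LEMMAS AND PROOFS =====

-- A's inner loop appends consecutive integers starting at k.
theorem pvInner (l : List Int) : ∀ (t : List Int) (k : Int),
    l.foldl (fun (st2 : List Int × Int) _ => (st2.1 ++ [st2.2], st2.2 + 1)) (t, k)
      = (t ++ PySem.List.pyRange k (k + l.length) 1, k + l.length) := by
  induction l with
  | nil =>
    intro t k
    simp [PySem.List.pyRange_one_eq_nil]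
  | cons x xs ih =>
    intro t k
    simp only [List.foldl_cons, List.length_cons]
    rw [ih (t ++ [k]) (k + 1)]
    have hc : ((xs.length + 1 : Nat) : Int) = (xs.length : Int) + 1 := by push_cast; ring
    rw [hc, show k + ((xs.length : Int) + 1) = k + 1 + (xs.length : Int) from by ring,
        PySem.List.pyRange_one_cons (show k < k + 1 + (xs.length : Int) by omega)]
    simp

-- A's outer loop: each iteration contributes one row of `size` consecutive integers.
theorem pvOuter (size : Int) (hs : 0 ≤ size) (l : List Int) : ∀ (g : List (List Int)) (k : Int),
    l.foldl
      (fun (st : List (List Int) × List Int × Int) _ =>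
        (st.1 ++ [((PySem.List.pyRange 0 size 1).foldl
            (fun (st2 : List Int × Int) _ => (st2.1 ++ [st2.2], st2.2 + 1)) (st.2.1, st.2.2)).1],
         [],
         ((PySem.List.pyRange 0 size 1).foldl
            (fun (st2 : List Int × Int) _ => (st2.1 ++ [st2.2], st2.2 + 1)) (st.2.1, st.2.2)).2))
      (g, [], k)
      = (g ++ (List.range l.length).map
            (fun (j : Nat) => PySem.List.pyRange (k + (j : Int) * size) (k + (j : Int) * size + size) 1),
         [], k + (l.length : Int) * size) := by
  induction l with
  | nil => intro g k; simp
  | cons x xs ih =>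
    intro g k
    simp only [List.foldl_cons]
    rw [pvInner]
    have hlen : ((PySem.List.pyRange 0 size 1).length : Int) = size := by
      rw [PySem.List.length_pyRange_one]; omega
    rw [hlen]
    simp only [List.nil_append]
    rw [ih (g ++ [PySem.List.pyRange k (k + size) 1]) (k + size)]
    simp only [List.length_cons, Prod.mk.injEq]
    refine ⟨?_, by simp, ?_⟩
    · rw [List.range_succ_eq_map, List.map_cons, List.map_map]
      simp only [List.append_assoc, List.singleton_append, Nat.cast_zero, zero_mul, add_zero]
      congr 1
      congr 1
      apply List.map_congr_left
      intro a _
      simp only [Function.comp, Nat.succ_eq_add_one]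
      congr 1 <;> push_cast <;> ring
    · push_cast; ring

-- slicing a contiguous integer range yields a contiguous integer range
theorem pvSlice (m l r : Int) (h0 : 0 ≤ l) (hlr : l ≤ r) (hrm : r ≤ m) :
    PySem.List.slice (PySem.List.pyRange 1 (m + 1) 1) (some l) (some r)
      = PySem.List.pyRange (l + 1) (r + 1) 1 := by
  rw [PySem.List.slice_toNat _ h0 (le_trans h0 hlr)]
  rw [PySem.List.pyRange_one_append 1 (l + 1) (m + 1) (by omega) (by omega)]
  rw [PySem.List.pyRange_one_append (l + 1) (r + 1) (m + 1) (by omega) (by omega)]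
  have hl1 : (PySem.List.pyRange 1 (l + 1) 1).length = l.toNat := by
    rw [PySem.List.length_pyRange_one]; omega
  have hB : (PySem.List.pyRange (l + 1) (r + 1) 1).length = r.toNat - l.toNat := by
    rw [PySem.List.length_pyRange_one]; omega
  rw [← List.append_assoc,
      List.drop_append_of_le_length (by simp [hl1]),
      List.drop_append_of_le_length (le_of_eq hl1.symm)]
  have hdrop : List.drop l.toNat (PySem.List.pyRange 1 (l + 1) 1) = [] := by
    rw [← hl1, List.drop_length]
  rw [hdrop, List.nil_append,
      List.take_append_of_le_length (le_of_eq hB.symm),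
      List.take_of_length_le (le_of_eq hB)]

-- ===== VERDICT (by name: the statement is the Claim_ definition above) =====
theorem create_size_game_spec : Claim_equal_create_size_game := by
  intro size _
  unfold Spec_create_size_game create_size_game create_size_game_alt
  by_cases hs : size ≤ 0
  · rw [if_pos hs, PySem.List.pyRange_one_eq_nil (by omega)]
    simp
  · rw [if_neg hs]
    have hs' : 0 ≤ size := by omega
    rw [pvOuter size hs']
    simp only [List.nil_append]
    have hlen : ((PySem.List.pyRange 0 size 1).length) = size.toNat := by
      rw [PySem.List.length_pyRange_one]; omega
    rw [hlen]
    have hR : PySem.List.pyRange 0 size 1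
        = (List.range size.toNat).map (fun (k : Nat) => (k : Int)) := by
      rw [PySem.List.pyRange_zero]
    conv_rhs => rw [hR]
    rw [List.map_map]
    apply List.map_congr_left
    intro j hj
    have hj' : ((j : Int)) < size := by
      have h := List.mem_range.mp hj
      omega
    have hj0 : (0 : Int) ≤ (j : Int) := Int.natCast_nonneg j
    simp only [Function.comp]
    have hmid := pvSlice (size * size) ((j : Int) * size) (((j : Int) + 1) * size)
      (by positivity) (by nlinarith) (by nlinarith)
    rw [hmid]
    congr 1 <;> ring
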